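-- pv_equiv track=rewrite | github.com/krzysiekbienias/algo-dragons | hakker_rank/ceritificates.py | one_name_check
-- ===== SOURCE A (Python) =====
-- def one_name_check(username):
--     username_list=list(username)
--     for i in range(len(username_list)):
--         for j in range(i+1,len(username_list)):
--             username_list[i],username_list[j]=username_list[j],username_list[i]
--             if ''.join(username_list)<username:
--                 return 'YES'
--             username_list[i],username_list[j]=username_list[j],username_list[i]
--     return 'NO'
-- ===== SOURCE B (Python) =====
-- def one_name_check(username):
--     # YES iff the string has an adjacent descent (is not non-decreasing):
--     # a swap can make the string strictly smaller iff some inversion exists,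
--     # and an inversion exists iff an adjacent one does.
--     for a, b in zip(username, username[1:]):
--         if b < a:
--             return 'YES'
--     return 'NO'
-- ===== Notes on version B (the rewrite author's own statement) =====
-- stated objective: faster
-- what changed: Replaces the O(n^3) try-every-swap-and-compare search with a single O(n) scan for an adjacent descent, since some swap makes the string smaller iff it is not non-decreasing.
import Mathlib
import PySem

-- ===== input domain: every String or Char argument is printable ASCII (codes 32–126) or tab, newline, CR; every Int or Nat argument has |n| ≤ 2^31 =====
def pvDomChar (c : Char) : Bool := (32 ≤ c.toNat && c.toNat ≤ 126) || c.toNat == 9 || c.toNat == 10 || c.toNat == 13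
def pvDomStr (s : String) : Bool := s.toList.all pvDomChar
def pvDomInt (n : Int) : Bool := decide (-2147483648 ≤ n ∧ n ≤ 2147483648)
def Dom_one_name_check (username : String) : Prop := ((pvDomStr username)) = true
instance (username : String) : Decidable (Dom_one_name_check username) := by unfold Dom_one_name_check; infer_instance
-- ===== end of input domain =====

-- B replaces A's O(n^3) try-every-swap search by an O(n) adjacent-descent scan (same result).


-- ===== PORT A =====
-- inner loop: for j in range(i+1, len): swap i,j; compare the joined list with username; swap back
def pvSwapJLoop (orig l : List Char) (i j : Nat) : Bool :=
  if _h : j < l.length then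
    if (l.set i (l.getD j ' ')).set j (l.getD i ' ') < orig then true
    else pvSwapJLoop orig l i (j + 1)
  else false
termination_by l.length - j

-- outer loop: for i in range(len)
def pvSwapILoop (orig l : List Char) (i : Nat) : Bool :=
  if _h : i < l.length then
    if pvSwapJLoop orig l i (i + 1) then true else pvSwapILoop orig l (i + 1)
  else false
termination_by l.length - i

def one_name_check (username : String) : String :=
  if pvSwapILoop username.toList username.toList 0 then "YES" else "NO"

-- ===== PORT B =====
-- B: scan the adjacent pairs zip(username, username[1:]) for a descent
def one_name_check_alt (username : String) : String :=
  if (username.toList.zip (username.toList.drop 1)).any (fun p => decide (p.2 < p.1))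
  then "YES" else "NO"

-- ===== PRECONDITION & SPEC =====
def Spec_one_name_check (username : String) (out : String) : Prop := out = one_name_check_alt username
instance (username : String) (out : String) : Decidable (Spec_one_name_check username out) := by unfold Spec_one_name_check; infer_instance

-- ===== CLAIM (what is proved, stated in full; the proofs are below) =====
def Claim_equal_one_name_check : Prop := ∀ (username : String), Dom_one_name_check username → Spec_one_name_check username (one_name_check username)

-- ===== LEMMAS AND PROOFS =====

-- A's swapped string is smaller than the original iff the two swapped characters descend.
theorem pv_swap_lt (l : List Char) (i k : Nat) (hik : i < k) (hk : k < l.length) :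
    ((l.set i (l.getD k ' ')).set k (l.getD i ' ') < l) ↔ l.getD k ' ' < l.getD i ' ' := by
  induction l generalizing i k with
  | nil => simp at hk
  | cons c t ih =>
    match k, hik with
    | m + 1, _ =>
      have hm : m < t.length := by simpa using hk
      match i with
      | 0 =>
        simp only [List.getD_cons_succ, List.getD_cons_zero, List.set_cons_zero,
          List.set_cons_succ]
        rw [List.cons_lt_cons_iff]
        constructor
        · rintro (h | ⟨hEq, hLt⟩)
          · exact h
          · exfalso
            rw [List.getD_eq_getElem t ' ' hm] at hEq
            rw [← hEq, List.set_getElem_self] at hLt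
            exact lt_irrefl _ hLt
        · exact fun h => Or.inl h
      | n + 1 =>
        simp only [List.getD_cons_succ, List.set_cons_succ]
        rw [List.cons_lt_cons_iff]
        constructor
        · rintro (h | ⟨_, hLt⟩)
          · exact absurd h (lt_irrefl c)
          · exact (ih n m (by omega) hm).mp hLt
        · exact fun h => Or.inr ⟨rfl, (ih n m (by omega) hm).mpr h⟩

theorem pv_jLoop_iff_aux (orig l : List Char) (i : Nat) : ∀ (n j : Nat), n = l.length - j →
    (pvSwapJLoop orig l i j = true ↔
      ∃ k, j ≤ k ∧ k < l.length ∧ (l.set i (l.getD k ' ')).set k (l.getD i ' ') < orig) := by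
  intro n
  induction n using Nat.strong_induction_on with
  | _ n ih =>
    intro j hn
    rw [pvSwapJLoop]
    split
    · rename_i hj
      by_cases hlt : (l.set i (l.getD j ' ')).set j (l.getD i ' ') < orig
      · rw [if_pos hlt]
        simp only [true_iff]
        exact ⟨j, le_refl j, hj, hlt⟩
      · rw [if_neg hlt, ih (l.length - (j + 1)) (by omega) (j + 1) rfl]
        constructor
        · rintro ⟨k, hk1, hk2, hk3⟩
          exact ⟨k, by omega, hk2, hk3⟩
        · rintro ⟨k, hk1, hk2, hk3⟩
          rcases Nat.eq_or_lt_of_le hk1 with rfl | h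
          · exact absurd hk3 hlt
          · exact ⟨k, by omega, hk2, hk3⟩
    · rename_i hj
      constructor
      · intro h; exact absurd h (by simp)
      · rintro ⟨k, hk1, hk2, _⟩
        exact absurd (lt_of_le_of_lt hk1 hk2) hj

theorem pv_jLoop_iff (orig l : List Char) (i j : Nat) :
    pvSwapJLoop orig l i j = true ↔
      ∃ k, j ≤ k ∧ k < l.length ∧ (l.set i (l.getD k ' ')).set k (l.getD i ' ') < orig :=
  pv_jLoop_iff_aux orig l i (l.length - j) j rfl

theorem pv_iLoop_iff_aux (orig l : List Char) : ∀ (n i : Nat), n = l.length - i →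
    (pvSwapILoop orig l i = true ↔
      ∃ i', i ≤ i' ∧ i' < l.length ∧ pvSwapJLoop orig l i' (i' + 1) = true) := by
  intro n
  induction n using Nat.strong_induction_on with
  | _ n ih =>
    intro i hn
    rw [pvSwapILoop]
    split
    · rename_i hi
      by_cases hj : pvSwapJLoop orig l i (i + 1) = true
      · rw [if_pos hj]
        simp only [true_iff]
        exact ⟨i, le_refl i, hi, hj⟩
      · rw [if_neg hj, ih (l.length - (i + 1)) (by omega) (i + 1) rfl]
        constructor
        · rintro ⟨i', h1, h2, h3⟩
          exact ⟨i', by omega, h2, h3⟩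
        · rintro ⟨i', h1, h2, h3⟩
          rcases Nat.eq_or_lt_of_le h1 with rfl | h
          · exact absurd h3 hj
          · exact ⟨i', by omega, h2, h3⟩
    · rename_i hi
      constructor
      · intro h; exact absurd h (by simp)
      · rintro ⟨i', h1, h2, _⟩
        exact absurd (lt_of_le_of_lt h1 h2) hi

theorem pv_iLoop_iff (orig l : List Char) (i : Nat) :
    pvSwapILoop orig l i = true ↔
      ∃ i', i ≤ i' ∧ i' < l.length ∧ pvSwapJLoop orig l i' (i' + 1) = true :=
  pv_iLoop_iff_aux orig l (l.length - i) i rfl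

-- B's scan finds an adjacent descent iff one exists.
theorem pv_any_zip_iff (l : List Char) :
    (l.zip (l.drop 1)).any (fun p => decide (p.2 < p.1)) = true ↔
      ∃ m, m + 1 < l.length ∧ l.getD (m + 1) ' ' < l.getD m ' ' := by
  induction l with
  | nil => simp
  | cons a t ih =>
    cases t with
    | nil => simp
    | cons b t' =>
      have hzip : ((a :: b :: t').zip ((a :: b :: t').drop 1)) =
          (a, b) :: ((b :: t').zip ((b :: t').drop 1)) := rfl
      rw [hzip, List.any_cons, Bool.or_eq_true, decide_eq_true_iff, ih]
      constructor
      · rintro (h | ⟨n, hn, hlt⟩)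
        · exact ⟨0, by simp, by simpa using h⟩
        · exact ⟨n + 1, by simp at hn ⊢; omega, by simpa using hlt⟩
      · rintro ⟨m, hm, hlt⟩
        cases m with
        | zero => exact Or.inl (by simpa using hlt)
        | succ n => exact Or.inr ⟨n, by simp at hm ⊢; omega, by simpa using hlt⟩

-- an inversion exists iff an adjacent descent exists
theorem pv_inversion_iff_descent (l : List Char) :
    (∃ i k, i < k ∧ k < l.length ∧ l.getD k ' ' < l.getD i ' ') ↔
      (∃ m, m + 1 < l.length ∧ l.getD (m + 1) ' ' < l.getD m ' ') := by
  constructor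
  · rintro ⟨i, k, hik, hk, hlt⟩
    by_contra hno
    push Not at hno
    have hchain : l.IsChain (· ≤ ·) := by
      rw [List.isChain_iff_getElem]
      intro m hm
      have := hno m hm
      rw [List.getD_eq_getElem l ' ' hm, List.getD_eq_getElem l ' ' (by omega)] at this
      exact this
    have hpw := List.isChain_iff_pairwise.mp hchain
    rw [List.pairwise_iff_getElem] at hpw
    have hle := hpw i k (by omega) hk hik
    rw [List.getD_eq_getElem l ' ' hk, List.getD_eq_getElem l ' ' (by omega)] at hlt
    exact absurd hle (not_le.mpr hlt)
  · rintro ⟨m, h, hlt⟩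
    exact ⟨m, m + 1, by omega, h, hlt⟩

-- ===== VERDICT (by name: the statement is the Claim_ definition above) =====
theorem one_name_check_spec : Claim_equal_one_name_check := by
  intro username _
  unfold Spec_one_name_check one_name_check one_name_check_alt
  set l := username.toList with hl
  have hcond : pvSwapILoop l l 0 = (l.zip (l.drop 1)).any (fun p => decide (p.2 < p.1)) := by
    rw [Bool.eq_iff_iff, pv_iLoop_iff, pv_any_zip_iff, ← pv_inversion_iff_descent]
    constructor
    · rintro ⟨i, _, hi, hj⟩
      rw [pv_jLoop_iff] at hj
      obtain ⟨k, hik, hk, hlt⟩ := hj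
      rw [pv_swap_lt l i k (by omega) hk] at hlt
      exact ⟨i, k, by omega, hk, hlt⟩
    · rintro ⟨i, k, hik, hk, hlt⟩
      refine ⟨i, by omega, by omega, ?_⟩
      rw [pv_jLoop_iff]
      exact ⟨k, by omega, hk, (pv_swap_lt l i k hik hk).mpr hlt⟩
  rw [hcond]
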